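-- pv_equiv track=rewrite | github.com/Crunch-io/catii | research/cubeloop.py | yielder
-- ===== SOURCE A (Python) =====
-- def yielder(dims):
--     remaining_dims = dims[1:]
--     if remaining_dims:
--         for c in dims[0]:
--             yield from yielder(remaining_dims)
--     else:
--         for c in dims[0]:
--             yield c
-- ===== SOURCE B (Python) =====
-- def yielder(dims):
--     # closed form: the last dim is yielded once per combination of the
--     # earlier dims, i.e. product-of-their-lengths many times
--     *heads, last = dims
--     reps = 1
--     for d in heads:
--         reps *= len(d)
--     for _ in range(reps):
--         yield from last
-- ===== Notes on version B (the rewrite author's own statement) =====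
-- stated objective: faster
-- what changed: Replaces the nested yield-from recursion by a closed form: multiply the lengths of all but the last dim and emit the last dim that many times, removing the per-element recursive generator frames.
-- outside the precondition, e.g. on yielder([]): A raises IndexError, B raises ValueError
import Mathlib
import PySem

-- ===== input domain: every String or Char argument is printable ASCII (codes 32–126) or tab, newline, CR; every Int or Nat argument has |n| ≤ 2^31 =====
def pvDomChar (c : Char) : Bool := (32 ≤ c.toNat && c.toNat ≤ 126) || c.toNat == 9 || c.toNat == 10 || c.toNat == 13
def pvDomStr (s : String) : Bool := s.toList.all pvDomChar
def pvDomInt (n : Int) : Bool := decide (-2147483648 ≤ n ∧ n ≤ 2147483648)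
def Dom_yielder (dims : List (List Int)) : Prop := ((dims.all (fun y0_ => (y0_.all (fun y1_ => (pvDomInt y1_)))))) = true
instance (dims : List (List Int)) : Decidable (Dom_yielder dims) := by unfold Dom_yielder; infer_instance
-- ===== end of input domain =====

-- B replaces the nested yield-from recursion by a closed form (product of the
-- earlier dims' lengths, then emit the last dim that many times); objective: simpler.

-- ===== PORT A =====
-- recursion on dims: if remaining_dims nonempty, for each c in dims[0] yield from
-- the recursive call, else yield each element of dims[0]
def yielder : List (List Int) → List Int
  | [] => []            -- Python: dims[0] raises IndexError here; excluded by Pre_yielder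
  | [d0] => d0
  | d0 :: d1 :: rest => d0.flatMap (fun _ => yielder (d1 :: rest))

-- ===== PORT B =====
def yielder_alt (dims : List (List Int)) : List Int :=
  let heads := dims.dropLast
  let last := (dims.getLast?).getD []     -- '*heads, last = dims' raises on []; excluded by Pre_yielder
  let reps := heads.foldl (fun a d => a * d.length) 1
  (List.range reps).flatMap (fun _ => last)

-- ===== PRECONDITION & SPEC =====
-- Pre_ excludes only dims = [], on which A raises IndexError (dims[0]) and B raises ValueError (unpacking)
def Pre_yielder (dims : List (List Int)) : Prop := dims ≠ []
instance (dims : List (List Int)) : Decidable (Pre_yielder dims) := by unfold Pre_yielder; infer_instance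
def pvWitness_yielder : List (List Int) := [[1, 2], [3]]
def Spec_yielder (dims : List (List Int)) (out : List Int) : Prop := out = yielder_alt dims
instance (dims : List (List Int)) (out : List Int) : Decidable (Spec_yielder dims out) := by unfold Spec_yielder; infer_instance

-- ===== CLAIM (what is proved, stated in full; the proofs are below) =====
def Claim_equal_yielder : Prop := ∀ (dims : List (List Int)), Dom_yielder dims → Pre_yielder dims → Spec_yielder dims (yielder dims)

-- ===== LEMMAS AND PROOFS =====

theorem flatMap_const {α β : Type} (l : List α) (L : List β) :
    l.flatMap (fun _ => L) = (List.replicate l.length L).flatten := by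
  induction l with
  | nil => rfl
  | cons x xs ih => simp [List.flatMap_cons, List.replicate_succ, ih]

theorem flatten_replicate_flatten {β : Type} (n m : Nat) (L : List β) :
    (List.replicate n ((List.replicate m L).flatten)).flatten =
      (List.replicate (n * m) L).flatten := by
  induction n with
  | zero => simp
  | succ k ih =>
      simp only [List.replicate_succ, List.flatten_cons, ih, Nat.succ_mul]
      rw [Nat.add_comm, List.replicate_add, List.flatten_append]

theorem foldl_mul_len (l : List (List Int)) (x : Nat) :
    l.foldl (fun a d => a * d.length) x = x * l.foldl (fun a d => a * d.length) 1 := by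
  induction l generalizing x with
  | nil => simp
  | cons d ds ih =>
      simp only [List.foldl_cons]
      rw [ih (x * d.length), ih (1 * d.length), Nat.one_mul, Nat.mul_assoc]

theorem yielder_eq_alt (dims : List (List Int)) (h : dims ≠ []) :
    yielder dims = yielder_alt dims := by
  induction dims with
  | nil => exact absurd rfl h
  | cons d0 rest ih =>
      cases rest with
      | nil => simp [yielder, yielder_alt]
      | cons d1 ds =>
          rw [show yielder (d0 :: d1 :: ds) = d0.flatMap (fun _ => yielder (d1 :: ds)) from rfl,
              ih (by simp)]
          simp only [yielder_alt, List.dropLast_cons_of_ne_nil (l := d1 :: ds) (by simp),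
            List.getLast?_cons_cons, List.foldl_cons]
          rw [flatMap_const, flatMap_const, flatMap_const]
          rw [foldl_mul_len ((d1 :: ds).dropLast) (1 * d0.length)]
          simp only [List.length_range, Nat.one_mul]
          exact flatten_replicate_flatten _ _ _

-- ===== VERDICT (by name: the statement is the Claim_ definition above) =====
theorem yielder_spec : Claim_equal_yielder := by
  intro dims _ hpre
  unfold Spec_yielder; exact yielder_eq_alt dims hpre
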